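-- pv_equiv track=rewrite | github.com/cesar34-lab/parcial | parcial_1/punto_1/ajedrez.py | run_afd
-- ===== SOURCE A (Python) =====
-- PIECES  = set('KQRBNkqrbn')
--
-- COLS    = set('abcdefghpP')
--
-- ROWS    = set('12345678')
--
-- ARROWS  = {'-'}
--
-- GT      = {'>'}
--
-- CAPTURE = {'X', 'x'}
--
-- def classify(ch):
--     if ch in PIECES:  return 'PIECE'
--     if ch in COLS:    return 'COL'
--     if ch in ROWS:    return 'ROW'
--     if ch in ARROWS:  return 'DASH'
--     if ch in GT:      return 'GT'
--     if ch in CAPTURE: return 'CAP'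
--     return 'OTHER'
--
-- TRANSITIONS = {
--     ('q0', 'PIECE'): 'q1',
--     ('q0', 'COL'):   'q1',
--     ('q1', 'COL'):   'q2',
--     ('q1', 'ROW'):   'q3',
--     ('q1', 'DASH'):  'q4',
--     ('q1', 'CAP'):   'q5',
--     ('q2', 'ROW'):   'q3',
--     ('q2', 'DASH'):  'q4',
--     ('q2', 'CAP'):   'q5',
--     ('q3', 'DASH'):  'q4',
--     ('q3', 'CAP'):   'q5',
--     ('q4', 'GT'):    'q5',
--     ('q5', 'PIECE'): 'q6',
--     ('q5', 'COL'):   'q7',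
--     ('q6', 'COL'):   'q7',
--     ('q7', 'ROW'):   'q8',
-- }
--
-- def run_afd(token):
--     """
--     Ejecuta el AFD sobre los movimiento de ajedrez.
--     Retorna (estado_final, traza_de_estados).
--     """
--     token = token.strip()
--     token = token.replace(' X ', 'X').replace(' x ', 'x')
--
--     state = 'q0'
--     trace = [state]
--
--     for ch in token:
--         if ch == ' ':
--             continue
--         cls = classify(ch)
--         key = (state, cls)
--         state = TRANSITIONS.get(key, 'qE')
--         trace.append(state)
--         if state == 'qE':
--             break
--
--     return state, trace
-- ===== SOURCE B (Python) =====
-- # Same DFA, but the transition table is replaced by explicit per-state control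
-- # flow (character tests inlined per state) and the trace is built by recursion.
--
-- def _step(state, ch):
--     if state == 'q0':
--         if ch in 'KQRBNkqrbnacdefghpP': return 'q1'
--     elif state == 'q1':
--         if ch in 'acdefghpP': return 'q2'
--         if ch in '12345678':  return 'q3'
--         if ch == '-':         return 'q4'
--         if ch in 'Xx':        return 'q5'
--     elif state == 'q2':
--         if ch in '12345678':  return 'q3'
--         if ch == '-':         return 'q4'
--         if ch in 'Xx':        return 'q5'
--     elif state == 'q3':
--         if ch == '-':         return 'q4'
--         if ch in 'Xx':        return 'q5'
--     elif state == 'q4':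
--         if ch == '>':         return 'q5'
--     elif state == 'q5':
--         if ch in 'KQRBNkqrbn': return 'q6'
--         if ch in 'acdefghpP':  return 'q7'
--     elif state == 'q6':
--         if ch in 'acdefghpP':  return 'q7'
--     elif state == 'q7':
--         if ch in '12345678':   return 'q8'
--     return 'qE'
--
-- def _go(chars, i, state):
--     if i == len(chars):
--         return state, []
--     ch = chars[i]
--     if ch == ' ':
--         return _go(chars, i + 1, state)
--     nxt = _step(state, ch)
--     if nxt == 'qE':
--         return 'qE', ['qE']
--     final, rest = _go(chars, i + 1, nxt)
--     return final, [nxt] + rest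
--
-- def run_afd(token):
--     t = token.strip().replace(' X ', 'X').replace(' x ', 'x')
--     final, rest = _go(t, 0, 'q0')
--     return final, ['q0'] + rest
-- ===== Notes on version B (the rewrite author's own statement) =====
-- stated objective: alternative
-- what changed: Replaces the classify-then-lookup TRANSITIONS dict with explicit per-state control flow (character tests inlined in each state's branch) and builds the trace by recursion front-to-back instead of appending to an accumulator.
import Mathlib
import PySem

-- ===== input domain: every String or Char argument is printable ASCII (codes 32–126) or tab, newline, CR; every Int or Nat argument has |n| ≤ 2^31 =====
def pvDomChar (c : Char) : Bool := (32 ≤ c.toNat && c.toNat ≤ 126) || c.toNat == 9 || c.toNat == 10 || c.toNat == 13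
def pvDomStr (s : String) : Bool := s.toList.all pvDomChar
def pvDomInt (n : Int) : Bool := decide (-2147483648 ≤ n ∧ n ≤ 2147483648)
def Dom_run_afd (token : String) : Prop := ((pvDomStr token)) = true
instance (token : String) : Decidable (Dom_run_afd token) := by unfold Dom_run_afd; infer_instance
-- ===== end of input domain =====

-- B replaces A's classify-then-TRANSITIONS-dict lookup with explicit per-state control
-- flow (character tests inlined in each state's branch) and builds the trace by
-- recursion front-to-back instead of appending to an accumulator; same result.

-- ===== PORT A =====
def piecesA : PySem.Set Char := PySem.Set.ofList ['K','Q','R','B','N','k','q','r','b','n']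
def colsA : PySem.Set Char := PySem.Set.ofList ['a','b','c','d','e','f','g','h','p','P']
def rowsA : PySem.Set Char := PySem.Set.ofList ['1','2','3','4','5','6','7','8']
def arrowsA : PySem.Set Char := PySem.Set.ofList ['-']
def gtA : PySem.Set Char := PySem.Set.ofList ['>']
def captureA : PySem.Set Char := PySem.Set.ofList ['X', 'x']

def classify (ch : Char) : String :=
  if PySem.Set.contains piecesA ch then "PIECE"
  else if PySem.Set.contains colsA ch then "COL"
  else if PySem.Set.contains rowsA ch then "ROW"
  else if PySem.Set.contains arrowsA ch then "DASH"
  else if PySem.Set.contains gtA ch then "GT"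
  else if PySem.Set.contains captureA ch then "CAP"
  else "OTHER"

def transitionsA : PySem.Dict (String × String) String := PySem.Dict.ofList
  [ (("q0", "PIECE"), "q1"), (("q0", "COL"), "q1"),
    (("q1", "COL"), "q2"), (("q1", "ROW"), "q3"), (("q1", "DASH"), "q4"), (("q1", "CAP"), "q5"),
    (("q2", "ROW"), "q3"), (("q2", "DASH"), "q4"), (("q2", "CAP"), "q5"),
    (("q3", "DASH"), "q4"), (("q3", "CAP"), "q5"),
    (("q4", "GT"), "q5"),
    (("q5", "PIECE"), "q6"), (("q5", "COL"), "q7"),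
    (("q6", "COL"), "q7"),
    (("q7", "ROW"), "q8") ]

-- A's for-loop with 'continue' on ' ' and 'break' on 'qE', carrying (state, trace)
def loopA : List Char → String → List String → String × List String
  | [], state, trace => (state, trace)
  | ch :: rest, state, trace =>
    if ch = ' ' then loopA rest state trace
    else
      let cls := classify ch
      let state' := PySem.Dict.getD transitionsA (state, cls) "qE"
      if state' = "qE" then (state', trace ++ [state'])
      else loopA rest state' (trace ++ [state'])

def run_afd (token : String) : String × List String :=
  let t := PySem.Str.replace (PySem.Str.replace (PySem.Str.strip token) " X " "X") " x " "x"
  loopA t.toList "q0" ["q0"]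

-- ===== PORT B =====
def q0L : List Char := ['K','Q','R','B','N','k','q','r','b','n','a','c','d','e','f','g','h','p','P']
def piecesL : List Char := ['K','Q','R','B','N','k','q','r','b','n']
def colsL : List Char := ['a','c','d','e','f','g','h','p','P']
def rowsL : List Char := ['1','2','3','4','5','6','7','8']
def capL : List Char := ['X','x']

def stepB (state : String) (ch : Char) : String :=
  if state = "q0" then
    if q0L.contains ch then "q1" else "qE"
  else if state = "q1" then
    if colsL.contains ch then "q2"
    else if rowsL.contains ch then "q3"
    else if ch = '-' then "q4"
    else if capL.contains ch then "q5" else "qE"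
  else if state = "q2" then
    if rowsL.contains ch then "q3"
    else if ch = '-' then "q4"
    else if capL.contains ch then "q5" else "qE"
  else if state = "q3" then
    if ch = '-' then "q4"
    else if capL.contains ch then "q5" else "qE"
  else if state = "q4" then
    if ch = '>' then "q5" else "qE"
  else if state = "q5" then
    if piecesL.contains ch then "q6"
    else if colsL.contains ch then "q7" else "qE"
  else if state = "q6" then
    if colsL.contains ch then "q7" else "qE"
  else if state = "q7" then
    if rowsL.contains ch then "q8" else "qE"
  else "qE"

def goB : List Char → String → String × List String
  | [], state => (state, [])
  | ch :: rest, state =>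
    if ch = ' ' then goB rest state
    else
      let nxt := stepB state ch
      if nxt = "qE" then ("qE", ["qE"])
      else
        let p := goB rest nxt
        (p.1, nxt :: p.2)

def run_afd_alt (token : String) : String × List String :=
  let t := PySem.Str.replace (PySem.Str.replace (PySem.Str.strip token) " X " "X") " x " "x"
  let p := goB t.toList "q0"
  (p.1, "q0" :: p.2)

-- ===== PRECONDITION & SPEC =====
def Spec_run_afd (token : String) (out : String × List String) : Prop := out = run_afd_alt token
instance (token : String) (out : String × List String) : Decidable (Spec_run_afd token out) := by unfold Spec_run_afd; infer_instance

-- ===== CLAIM (what is proved, stated in full; the proofs are below) =====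
def Claim_equal_run_afd : Prop := ∀ (token : String), Dom_run_afd token → Spec_run_afd token (run_afd token)

-- ===== LEMMAS AND PROOFS =====

-- every character falls into exactly one of the seven classes B's branches test for
set_option maxRecDepth 10000 in
lemma classify7 (ch : Char) :
    ch ∈ piecesL ∨ ch ∈ colsL ∨ ch ∈ rowsL ∨ ch = '-' ∨ ch = '>' ∨ ch ∈ capL ∨
      (classify ch = "OTHER" ∧ ch ∉ piecesL ∧ ch ∉ colsL ∧ ch ∉ rowsL ∧ ch ≠ '-' ∧ ch ≠ '>' ∧ ch ∉ capL) := by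
  by_cases h1 : ch ∈ piecesL
  · exact Or.inl h1
  by_cases h2 : ch ∈ colsL
  · exact Or.inr (Or.inl h2)
  by_cases h3 : ch ∈ rowsL
  · exact Or.inr (Or.inr (Or.inl h3))
  by_cases h4 : ch = '-'
  · exact Or.inr (Or.inr (Or.inr (Or.inl h4)))
  by_cases h5 : ch = '>'
  · exact Or.inr (Or.inr (Or.inr (Or.inr (Or.inl h5))))
  by_cases h6 : ch ∈ capL
  · exact Or.inr (Or.inr (Or.inr (Or.inr (Or.inr (Or.inl h6)))))
  refine Or.inr (Or.inr (Or.inr (Or.inr (Or.inr (Or.inr ⟨?_, h1, h2, h3, h4, h5, h6⟩)))))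
  simp only [classify, piecesA, colsA, rowsA, arrowsA, gtA, captureA, PySem.Set.ofList]
  simp_all [piecesL, colsL, rowsL, capL, PySem.Set.contains]

-- the states reachable by either automaton (loop invariant)
def statesS : List String := ["q0","q1","q2","q3","q4","q5","q6","q7","q8"]

-- on reachable states, B's inlined per-state dispatch agrees with A's table lookup
set_option maxRecDepth 100000 in
lemma step_eq (state : String) (ch : Char) (hs : state ∈ statesS) :
    stepB state ch = PySem.Dict.getD transitionsA (state, classify ch) "qE" := by
  rcases classify7 ch with h|h|h|rfl|rfl|h|⟨hcl, h1, h2, h3, h4, h5, h6⟩ <;>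
    fin_cases hs <;>
    first
      | (fin_cases h <;> decide)
      | decide
      | (rw [hcl]
         simp only [piecesL, colsL, rowsL, capL, List.mem_cons, List.not_mem_nil, or_false, not_or] at h1 h2 h3 h6
         simp [stepB, q0L, colsL, rowsL, capL, piecesL, h1, h2, h3, h4, h5, h6]
         decide)

set_option maxRecDepth 10000 in
lemma stepB_mem (state : String) (ch : Char) :
    stepB state ch = "qE" ∨ stepB state ch ∈ statesS := by
  unfold stepB
  split_ifs <;> decide

lemma loop_eq (chars : List Char) : ∀ (state : String) (trace : List String), state ∈ statesS →
    loopA chars state trace = ((goB chars state).1, trace ++ (goB chars state).2) := by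
  induction chars with
  | nil => intro state trace _; simp [loopA, goB]
  | cons ch rest ih =>
    intro state trace hs
    by_cases hsp : ch = ' '
    · simp only [loopA, goB, if_pos hsp]
      exact ih state trace hs
    · have he := (step_eq state ch hs).symm
      simp only [loopA, goB, if_neg hsp, he]
      rcases stepB_mem state ch with hqe | hmem
      · simp [hqe]
      · have hne : stepB state ch ≠ "qE" := by
          intro hc; rw [hc] at hmem; revert hmem; decide
        simp [hne, ih _ _ hmem]

-- ===== VERDICT (by name: the statement is the Claim_ definition above) =====
theorem run_afd_spec : Claim_equal_run_afd := by
  intro token _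
  unfold Spec_run_afd run_afd run_afd_alt
  exact loop_eq _ "q0" ["q0"] (by decide)
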